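-- pv_equiv track=rewrite | github.com/Simplemaker/LS-Basic | lsbasic.py | labelSearch
-- ===== SOURCE A (Python) =====
-- def labelSearch(numlist, label):
--   mode='findLabel'
--   for i in range(len(numlist)):
--     c = numlist[i]
--     if mode=='findLabel':
--       if c==26:
--         mode='labelCheck'
--       elif c in [15,56,74,78,80,77]:
--         mode='skip1'
--       elif c == 37:
--         mode='skipDone'
--     elif mode=='skip1':
--       mode='findLabel'
--     elif mode=='skipDone':
--       if c==38:
--         mode='findLabel'
--     elif mode=='labelCheck':
--       if c==label:
--         return i
--       else:
--         mode='findLabel'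
--   return -1
-- ===== SOURCE B (Python) =====
-- def labelSearch(numlist, label):
--   n = len(numlist)
--   i = 0
--   while i < n:
--     c = numlist[i]
--     if c == 26:
--       if i + 1 < n and numlist[i + 1] == label:
--         return i + 1
--       i += 2
--     elif c in (15, 56, 74, 78, 80, 77):
--       i += 2
--     elif c == 37:
--       i += 1
--       while i < n and numlist[i] != 38:
--         i += 1
--       i += 1
--     else:
--       i += 1
--   return -1
-- ===== Notes on version B (the rewrite author's own statement) =====
-- stated objective: alternative
-- what changed: Replaced the per-element mode state machine with a while-loop over an explicit index pointer that consumes variable-length instructions by index arithmetic (skip 2 for opcode+operand, inner scan to the terminating 38 for the 37 block).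
import Mathlib
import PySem

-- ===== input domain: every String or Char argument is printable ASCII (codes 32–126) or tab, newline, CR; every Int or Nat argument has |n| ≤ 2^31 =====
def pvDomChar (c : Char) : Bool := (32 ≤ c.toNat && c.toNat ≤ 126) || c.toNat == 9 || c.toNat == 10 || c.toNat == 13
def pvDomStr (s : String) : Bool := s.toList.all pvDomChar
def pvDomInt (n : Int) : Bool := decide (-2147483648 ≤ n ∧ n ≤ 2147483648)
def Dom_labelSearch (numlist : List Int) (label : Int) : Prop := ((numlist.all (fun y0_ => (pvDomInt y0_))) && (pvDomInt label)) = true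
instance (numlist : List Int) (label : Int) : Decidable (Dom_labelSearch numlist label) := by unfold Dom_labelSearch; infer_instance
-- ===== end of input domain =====

-- B replaces A's per-element mode state machine by an index pointer consuming
-- variable-length instructions with index arithmetic (objective: alternative).

-- ===== PORT A =====
-- A's string mode values rendered as an enumeration (same four states, same transitions)
inductive LSMode : Type
  | findLabel | skip1 | skipDone | labelCheck
deriving DecidableEq, Repr

-- the 'for i in range(len(numlist))' loop: i is the loop variable, rem the number of
-- iterations still to run (rem = len - i throughout; the getD default is never used)
def labelSearchLoop (numlist : List Int) (label : Int) (mode : LSMode) (i : Nat) (rem : Nat) : Int :=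
  match rem with
  | 0 => -1
  | rem' + 1 =>
    let c := numlist.getD i 0
    match mode with
    | .findLabel =>
        if c = 26 then labelSearchLoop numlist label .labelCheck (i+1) rem'
        else if c = 15 ∨ c = 56 ∨ c = 74 ∨ c = 78 ∨ c = 80 ∨ c = 77 then
          labelSearchLoop numlist label .skip1 (i+1) rem'
        else if c = 37 then labelSearchLoop numlist label .skipDone (i+1) rem'
        else labelSearchLoop numlist label .findLabel (i+1) rem'
    | .skip1 => labelSearchLoop numlist label .findLabel (i+1) rem'
    | .skipDone =>
        if c = 38 then labelSearchLoop numlist label .findLabel (i+1) rem'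
        else labelSearchLoop numlist label .skipDone (i+1) rem'
    | .labelCheck =>
        if c = label then (i : Int)
        else labelSearchLoop numlist label .findLabel (i+1) rem'

def labelSearch (numlist : List Int) (label : Int) : Int :=
  labelSearchLoop numlist label .findLabel 0 numlist.length

-- ===== PORT B =====
-- inner 'while i < n and numlist[i] != 38: i += 1' of Source B, returning the stopped index;
-- fuel is only a termination guard (len suffices: the scan stops at latest at i = len)
def altSkip38 (numlist : List Int) (fuel : Nat) (i : Nat) : Nat :=
  match fuel with
  | 0 => i
  | f + 1 =>
    if i < numlist.length ∧ numlist.getD i 0 ≠ 38 then altSkip38 numlist f (i+1)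
    else i

-- the outer 'while i < n' loop of Source B over the explicit index pointer i; fuel is only a
-- termination guard (each iteration advances i by at least 1, so len+1 suffices)
def labelSearchAltGo (numlist : List Int) (label : Int) (fuel : Nat) (i : Nat) : Int :=
  match fuel with
  | 0 => -1
  | f + 1 =>
    if i < numlist.length then
      let c := numlist.getD i 0
      if c = 26 then
        if i + 1 < numlist.length ∧ numlist.getD (i+1) 0 = label then ((i+1 : Nat) : Int)
        else labelSearchAltGo numlist label f (i+2)
      else if c = 15 ∨ c = 56 ∨ c = 74 ∨ c = 78 ∨ c = 80 ∨ c = 77 then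
        labelSearchAltGo numlist label f (i+2)
      else if c = 37 then
        labelSearchAltGo numlist label f (altSkip38 numlist numlist.length (i+1) + 1)
      else labelSearchAltGo numlist label f (i+1)
    else -1

def labelSearch_alt (numlist : List Int) (label : Int) : Int :=
  labelSearchAltGo numlist label (numlist.length + 1) 0

-- ===== PRECONDITION & SPEC =====
def Spec_labelSearch (numlist : List Int) (label : Int) (out : Int) : Prop := out = labelSearch_alt numlist label
instance (numlist : List Int) (label : Int) (out : Int) : Decidable (Spec_labelSearch numlist label out) := by unfold Spec_labelSearch; infer_instance

-- ===== CLAIM (what is proved, stated in full; the proofs are below) =====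
def Claim_equal_labelSearch : Prop := ∀ (numlist : List Int) (label : Int), Dom_labelSearch numlist label → Spec_labelSearch numlist label (labelSearch numlist label)

-- ===== LEMMAS AND PROOFS =====

theorem altGo_out (numlist : List Int) (label : Int) (f i : Nat)
    (h : ¬ i < numlist.length) : labelSearchAltGo numlist label f i = -1 := by
  cases f with
  | zero => rfl
  | succ f => rw [labelSearchAltGo]; simp [h]

theorem skip_out (numlist : List Int) (f i : Nat)
    (h : ¬ i < numlist.length) : altSkip38 numlist f i = i := by
  cases f with
  | zero => rfl
  | succ f => rw [altSkip38]; simp [h]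

-- once fuel ≥ len - i the inner scan's result no longer depends on the fuel
theorem skip_fuel_irrel (numlist : List Int) :
    ∀ (f g i : Nat), numlist.length ≤ f + i → numlist.length ≤ g + i →
    altSkip38 numlist f i = altSkip38 numlist g i := by
  intro f
  induction f with
  | zero =>
    intro g i hf hg
    rw [skip_out _ _ _ (by omega), skip_out _ _ _ (by omega)]
  | succ f ih =>
    intro g i hf hg
    by_cases hi : i < numlist.length
    · have : ∃ g', g = g' + 1 := ⟨g - 1, by omega⟩
      obtain ⟨g', rfl⟩ := this
      rw [altSkip38, altSkip38]
      split
      · exact ih g' (i+1) (by omega) (by omega)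
      · rfl
    · rw [skip_out _ _ _ hi, skip_out _ _ _ hi]

-- A in skipDone mode from index j equals B continuing after its inner 38-scan,
-- given agreement of the findLabel/outer states at every later index
theorem skipDone_eq (numlist : List Int) (label : Int) :
    ∀ (k : Nat), ∀ (j fo : Nat), numlist.length - j ≤ k → numlist.length < fo + j →
    (∀ (m f' : Nat), j ≤ m → numlist.length < f' + m →
        labelSearchLoop numlist label .findLabel m (numlist.length - m)
          = labelSearchAltGo numlist label f' m) →
    labelSearchLoop numlist label .skipDone j (numlist.length - j)
      = labelSearchAltGo numlist label fo (altSkip38 numlist numlist.length j + 1) := by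
  intro k
  induction k with
  | zero =>
    intro j fo hk hfo _
    have hj : ¬ j < numlist.length := by omega
    have h0 : numlist.length - j = 0 := by omega
    rw [h0, skip_out _ _ _ hj, labelSearchLoop, altGo_out _ _ _ _ (by omega)]
  | succ k ih =>
    intro j fo hk hfo H
    by_cases hj : j < numlist.length
    · have hrem : numlist.length - j = (numlist.length - (j+1)) + 1 := by omega
      have hn : ∃ n', numlist.length = n' + 1 := ⟨numlist.length - 1, by omega⟩
      obtain ⟨n', hn'⟩ := hn
      rw [hrem, labelSearchLoop]
      by_cases h38 : numlist.getD j 0 = 38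
      · have hskip : altSkip38 numlist numlist.length j = j := by
          rw [hn', altSkip38, if_neg (fun hc => hc.2 h38)]
        rw [hskip]
        simp only [h38]
        exact H (j+1) fo (by omega) (by omega)
      · have hskip : altSkip38 numlist numlist.length j
            = altSkip38 numlist numlist.length (j+1) := by
          rw [hn', altSkip38, if_pos ⟨by omega, h38⟩]
          exact skip_fuel_irrel numlist n' (n'+1) (j+1) (by omega) (by omega)
        rw [hskip]
        simp only [h38, if_false]
        exact ih (j+1) fo (by omega) (by omega) (fun m f' hm hf' => H m f' (by omega) hf')
    · have h0 : numlist.length - j = 0 := by omega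
      rw [h0, skip_out _ _ _ hj, labelSearchLoop, altGo_out _ _ _ _ (by omega)]

theorem main_eq (numlist : List Int) (label : Int) :
    ∀ (k : Nat), ∀ (i f : Nat), numlist.length - i ≤ k → numlist.length < f + i →
    labelSearchLoop numlist label .findLabel i (numlist.length - i)
      = labelSearchAltGo numlist label f i := by
  intro k
  induction k with
  | zero =>
    intro i f hk hf
    have hi : ¬ i < numlist.length := by omega
    have h0 : numlist.length - i = 0 := by omega
    rw [h0, labelSearchLoop, altGo_out _ _ _ _ hi]
  | succ k ih =>
    intro i f hk hf
    by_cases hi : i < numlist.length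
    · have hrem : numlist.length - i = (numlist.length - (i+1)) + 1 := by omega
      have hfpos : ∃ f', f = f' + 1 := ⟨f - 1, by omega⟩
      obtain ⟨f', rfl⟩ := hfpos
      rw [hrem, labelSearchLoop, labelSearchAltGo, if_pos hi]
      simp only
      by_cases h26 : numlist.getD i 0 = 26
      · rw [if_pos h26, if_pos h26]
        by_cases hi1 : i + 1 < numlist.length
        · have hrem1 : numlist.length - (i+1) = (numlist.length - (i+2)) + 1 := by omega
          rw [hrem1, labelSearchLoop]
          by_cases hlb : numlist.getD (i+1) 0 = label
          · rw [if_pos hlb, if_pos ⟨hi1, hlb⟩]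
          · rw [if_neg hlb, if_neg (by tauto)]
            exact ih (i+2) f' (by omega) (by omega)
        · have h0 : numlist.length - (i+1) = 0 := by omega
          rw [h0, labelSearchLoop, if_neg (by tauto), altGo_out _ _ _ _ (by omega)]
      · rw [if_neg h26, if_neg h26]
        by_cases hop : numlist.getD i 0 = 15 ∨ numlist.getD i 0 = 56 ∨ numlist.getD i 0 = 74 ∨
            numlist.getD i 0 = 78 ∨ numlist.getD i 0 = 80 ∨ numlist.getD i 0 = 77
        · rw [if_pos hop, if_pos hop]
          by_cases hi1 : i + 1 < numlist.length
          · have hrem1 : numlist.length - (i+1) = (numlist.length - (i+2)) + 1 := by omega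
            rw [hrem1, labelSearchLoop]
            exact ih (i+2) f' (by omega) (by omega)
          · have h0 : numlist.length - (i+1) = 0 := by omega
            rw [h0, labelSearchLoop, altGo_out _ _ _ _ (by omega)]
        · rw [if_neg hop, if_neg hop]
          by_cases h37 : numlist.getD i 0 = 37
          · rw [if_pos h37, if_pos h37]
            exact skipDone_eq numlist label k (i+1) f' (by omega) (by omega)
              (fun m f'' hm hf'' => ih m f'' (by omega) hf'')
          · rw [if_neg h37, if_neg h37]
            exact ih (i+1) f' (by omega) (by omega)
    · have h0 : numlist.length - i = 0 := by omega
      rw [h0, labelSearchLoop, altGo_out _ _ _ _ hi]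

-- ===== VERDICT (by name: the statement is the Claim_ definition above) =====
theorem labelSearch_spec : Claim_equal_labelSearch := by
  intro numlist label _
  unfold Spec_labelSearch labelSearch labelSearch_alt
  have := main_eq numlist label numlist.length 0 (numlist.length + 1) (by omega) (by omega)
  simpa using this
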